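-- pv_equiv track=rewrite | github.com/VishalDeoPrasad/GeeksforGeeks | Triangle shrinking downwards.py | triDownwards
-- ===== SOURCE A (Python) =====
-- def triDownwards(S):
--     ans = ""
--     for i in range(len(S)):
--         for j in range(len(S)):
--             if i > j:
--                 ans += "."
--             else:
--                 ans += S[j]
--     return ans
-- ===== SOURCE B (Python) =====
-- def triDownwards(S):
--     # Row i of the output is '.'*i followed by S[i:]; join the rows directly.
--     return "".join("." * i + S[i:] for i in range(len(S)))
-- ===== Notes on version B (the rewrite author's own statement) =====
-- stated objective: faster
-- what changed: Replaces the per-character nested loop with its if/else branch by a single pass that emits each row as i dots followed by the slice S[i:], joining the rows at the end instead of growing the answer one character at a time.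
import Mathlib
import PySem

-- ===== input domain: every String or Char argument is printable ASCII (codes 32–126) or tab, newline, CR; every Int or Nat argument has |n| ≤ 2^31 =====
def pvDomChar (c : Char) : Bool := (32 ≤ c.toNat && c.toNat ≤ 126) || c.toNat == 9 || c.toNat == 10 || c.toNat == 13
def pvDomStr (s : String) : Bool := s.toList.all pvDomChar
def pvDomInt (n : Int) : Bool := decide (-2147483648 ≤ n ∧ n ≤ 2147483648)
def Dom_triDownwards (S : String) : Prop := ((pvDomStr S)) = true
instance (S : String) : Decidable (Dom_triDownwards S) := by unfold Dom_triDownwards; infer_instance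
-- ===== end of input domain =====

-- B replaces A's per-character nested loop and if/else branch by emitting each row
-- as i dots followed by the slice S[i:] and joining the rows (objective: faster, constant factor).

-- ===== PORT A =====
-- literal port: ans accumulated character by character over the nested index loops
def triDownwards (S : String) : String :=
  let cs := S.toList
  let n := cs.length
  String.mk ((List.range n).foldl (fun ans i =>
    (List.range n).foldl (fun ans j =>
      if i > j then ans ++ ['.'] else ans ++ [cs.getD j ' ']) ans) [])

-- ===== PORT B =====
-- port of Source B: join over rows '.'*i + S[i:]  (S[i:] for 0 ≤ i is drop i)
def triDownwards_alt (S : String) : String :=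
  let cs := S.toList
  String.mk (((List.range cs.length).map
    (fun i => List.replicate i '.' ++ cs.drop i)).flatten)

-- ===== PRECONDITION & SPEC =====
def Spec_triDownwards (S : String) (out : String) : Prop := out = triDownwards_alt S
instance (S : String) (out : String) : Decidable (Spec_triDownwards S out) := by unfold Spec_triDownwards; infer_instance

-- ===== CLAIM (what is proved, stated in full; the proofs are below) =====
def Claim_equal_triDownwards : Prop := ∀ (S : String), Dom_triDownwards S → Spec_triDownwards S (triDownwards S)

-- ===== LEMMAS AND PROOFS =====

-- A's inner j-loop over row i produces exactly i dots followed by the tail of the string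
theorem pvRow (cs : List Char) (i : Nat) (hi : i ≤ cs.length) :
    (List.range cs.length).map (fun j => if i > j then '.' else cs.getD j ' ')
      = List.replicate i '.' ++ cs.drop i := by
  apply List.ext_getElem
  · simp; omega
  · intro k h1 h2
    simp only [List.getElem_map, List.getElem_range]
    by_cases hk : k < i
    · rw [List.getElem_append_left (by simpa using hk)]
      simp [hk]
    · rw [List.getElem_append_right (by simpa using hk)]
      have hkn : k < cs.length := by simpa using h1
      simp only [List.length_replicate, List.getElem_drop]
      rw [if_neg (by omega), List.getD_eq_getElem cs ' ' hkn]
      congr 1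
      omega

theorem pvInner (cs : List Char) (i : Nat) (ans : List Char) :
    (List.range cs.length).foldl (fun ans j =>
        if i > j then ans ++ ['.'] else ans ++ [cs.getD j ' ']) ans
      = ans ++ (List.range cs.length).map (fun j => if i > j then '.' else cs.getD j ' ') := by
  have hf : (fun (ans : List Char) j =>
        if i > j then ans ++ ['.'] else ans ++ [cs.getD j ' '])
      = (fun ans j => ans ++ [if i > j then '.' else cs.getD j ' ']) := by
    funext a j; split <;> rfl
  rw [hf, PySem.List.foldl_append_singleton_eq_map]

-- ===== VERDICT (by name: the statement is the Claim_ definition above) =====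
theorem triDownwards_spec : Claim_equal_triDownwards := by
  intro S _
  unfold Spec_triDownwards triDownwards triDownwards_alt
  simp only
  congr 1
  have h1 : ∀ ans, (List.range S.toList.length).foldl (fun ans i =>
      (List.range S.toList.length).foldl (fun ans j =>
        if i > j then ans ++ ['.'] else ans ++ [S.toList.getD j ' ']) ans) ans
      = ans ++ (List.range S.toList.length).flatMap
          (fun i => (List.range S.toList.length).map
            (fun j => if i > j then '.' else S.toList.getD j ' ')) := by
    intro ans
    rw [show (fun (ans : List Char) i =>
        (List.range S.toList.length).foldl (fun ans j =>
          if i > j then ans ++ ['.'] else ans ++ [S.toList.getD j ' ']) ans)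
      = (fun ans i => ans ++ (List.range S.toList.length).map
          (fun j => if i > j then '.' else S.toList.getD j ' ')) from by
        funext a i; exact pvInner S.toList i a]
    exact PySem.List.foldl_append_eq_flatMap _ _ _
  rw [h1, List.nil_append, List.flatMap_def]
  congr 1
  apply List.map_congr_left
  intro i hi
  exact pvRow S.toList i (Nat.le_of_lt (List.mem_range.mp hi))
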